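-- pv_equiv track=rewrite | github.com/minsik-ai/ProblemSolving | atcoder/agc039/q_A.py | solve
-- ===== SOURCE A (Python) =====
-- def solve(text, count):
--     if len(text) == 1:
--         return count // 2
--
--     # split chars into first part & last part & middle parts & joint parts
--     first_ch = text[0]
--
--     # Endpoints exclusive
--     first_index = -1
--     middle_index = -1
--
--     for i, ch in enumerate(text):
--         if ch == first_ch:
--             continue
--         else:
--             first_index = i
--             break
--
--     if first_index == -1:
--         # All Same Character
--         return (len(text) * count) // 2
--
--     for i in range(len(text) - 1, first_index - 1, -1):
--         if text[i] == first_ch: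
--             continue
--         else:
--             middle_index = i + 1
--             break
--
--     first_part = text[:first_index]
--     middle_part = text[first_index:middle_index]
--     end_part = text[middle_index:]
--     joint_part = end_part + first_part
--
--     def calc_changes(raw_part):
--         change = 0
--
--         part = [ch for ch in raw_part]
--
--         for i, ch in enumerate(part):
--             if i == 0:
--                 continue
--             if part[i - 1] == part[i] and part[i - 1] != '!':
--                 part[i] = '!'  # Any char fine since we can choose any
--                 change += 1
--                 continue
--
--         return change
--
--     return calc_changes(first_part) + calc_changes(middle_part) * count + \
--            calc_changes(joint_part) * (count - 1) + calc_changes(end_part)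
-- ===== SOURCE B (Python) =====
-- def solve(text, count):
--     # Run-length encode once, then pure junction arithmetic (no slicing/marking pass).
--     runs = []
--     for ch in text:
--         if runs and runs[-1][0] == ch:
--             runs[-1] = (ch, runs[-1][1] + 1)
--         else:
--             runs.append((ch, 1))
--     if len(runs) <= 1:
--         # empty, single char, or all one character
--         return (len(text) * count) // 2
--     base = sum(L // 2 for _, L in runs)
--     a = runs[0][1]
--     b = runs[-1][1]
--     if runs[0][0] != runs[-1][0]:
--         return base * count
--     # first and last run merge at every junction of the repeated string
--     return a // 2 + b // 2 + (count - 1) * ((a + b) // 2) + count * (base - a // 2 - b // 2)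
-- ===== Notes on version B (the rewrite author's own statement) =====
-- stated objective: simpler
-- what changed: Replaces A's first/middle/end/joint string-slicing plus a sentinel-marking greedy pass over each piece by a single run-length encoding of the text and a closed junction-merge formula over the run lengths.
-- intended difference: On non-uniform texts whose count-fold repetition contains two adjacent '!' (the character A uses as its in-band sentinel) — the text contains '!!' with count ≠ 0, or its leading and trailing '!'-runs are both odd so consecutive copies abut in '!!' (except count = 1 with no '!!') — A's greedy pass mistakes real '!' for its own marks and returns an undercount of the required changes, while B returns the true minimal number of changes. — e.g. on solve("a!!b", 1): A returns 0, B returns 1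
import Mathlib
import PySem

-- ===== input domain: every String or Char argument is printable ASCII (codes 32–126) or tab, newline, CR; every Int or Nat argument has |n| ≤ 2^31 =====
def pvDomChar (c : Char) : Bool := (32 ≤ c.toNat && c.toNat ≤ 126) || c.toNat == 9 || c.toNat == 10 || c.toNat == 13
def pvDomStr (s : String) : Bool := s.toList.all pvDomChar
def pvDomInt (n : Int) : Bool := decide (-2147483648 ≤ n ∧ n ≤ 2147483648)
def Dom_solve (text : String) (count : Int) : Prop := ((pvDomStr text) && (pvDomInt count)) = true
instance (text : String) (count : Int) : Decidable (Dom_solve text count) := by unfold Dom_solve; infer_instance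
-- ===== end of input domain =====

-- B replaces A's slicing + sentinel-marking pass by run-length encoding + junction arithmetic;
-- B differs from A only on the '!'-sentinel inputs stated at D_solve below (return value only, no mutation).

-- ===== PORT A =====
-- first `for i, ch in enumerate(text): …` loop (break at the first char ≠ first_ch, else -1)
def findDiff (firstCh : Char) : List Char → Int → Int
  | [], _ => -1
  | c :: cs, i => if c = firstCh then findDiff firstCh cs (i + 1) else i

-- body of `for i in range(len(text)-1, first_index-1, -1): …`, structurally over the range list;
-- the `.getD firstCh` default is never used: every index the range produces is in bounds.
def findMidGo (l : List Char) (firstCh : Char) : List Int → Int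
  | [] => -1
  | i :: is =>
    if (PySem.List.pyGet? l i).getD firstCh = firstCh then findMidGo l firstCh is else i + 1

-- `calc_changes` inner loop, structurally over the indices of `enumerate(part)` (ch itself is
-- unused by the body, which reads part[i]); the list `part` is mutated in place (part[i] = '!');
-- the `.getD _ ' '` defaults are never used since 1 ≤ i < part.length at every read.
def calcGo : List Nat → List Char → Int → Int
  | [], _, change => change
  | i :: is, part, change =>
    if i = 0 then calcGo is part change
    else if part.getD (i - 1) ' ' = part.getD i ' ' ∧ part.getD (i - 1) ' ' ≠ '!' then
      calcGo is (part.set i '!') (change + 1)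
    else calcGo is part change

def calcChanges (rawPart : List Char) : Int := calcGo (List.range rawPart.length) rawPart 0

def solve (text : String) (count : Int) : Int :=
  let l := text.toList
  if l.length = 1 then PySem.Int.floordiv count 2
  else
    -- first_ch = text[0]; Pre_solve excludes the empty string, where Python raises IndexError
    let firstCh := l.headD ' '
    let firstIndex := findDiff firstCh l 0
    if firstIndex = -1 then PySem.Int.floordiv ((l.length : Int) * count) 2
    else
      let middleIndex := findMidGo l firstCh (PySem.List.pyRange ((l.length : Int) - 1) (firstIndex - 1) (-1))
      let firstPart := PySem.List.slice l none (some firstIndex)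
      let middlePart := PySem.List.slice l (some firstIndex) (some middleIndex)
      let endPart := PySem.List.slice l (some middleIndex) none
      let jointPart := endPart ++ firstPart
      calcChanges firstPart + calcChanges middlePart * count +
        calcChanges jointPart * (count - 1) + calcChanges endPart

-- ===== PORT B =====
-- `if runs and runs[-1][0] == ch: runs[-1] = (ch, runs[-1][1] + 1) else: runs.append((ch, 1))`
def rleStep (rs : List (Char × Int)) (ch : Char) : List (Char × Int) :=
  match rs.getLast? with
  | some (c, n) => if c = ch then rs.dropLast ++ [(ch, n + 1)] else rs ++ [(ch, 1)]
  | none => rs ++ [(ch, 1)]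

def solve_alt (text : String) (count : Int) : Int :=
  let l := text.toList
  let runs := l.foldl rleStep []
  if runs.length ≤ 1 then PySem.Int.floordiv ((l.length : Int) * count) 2
  else
    let base := (runs.map (fun p => PySem.Int.floordiv p.2 2)).sum
    let a := (runs.headD (' ', 0)).2
    let b := (runs.getLastD (' ', 0)).2
    if (runs.headD (' ', 0)).1 ≠ (runs.getLastD (' ', 0)).1 then base * count
    else
      PySem.Int.floordiv a 2 + PySem.Int.floordiv b 2 +
        (count - 1) * PySem.Int.floordiv (a + b) 2 +
        count * (base - PySem.Int.floordiv a 2 - PySem.Int.floordiv b 2)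

-- ===== PRECONDITION & SPEC =====
-- Pre_solve excludes only the empty string, on which A raises IndexError at text[0].
def Pre_solve (text : String) (count : Int) : Prop := text.toList ≠ []
instance (text : String) (count : Int) : Decidable (Pre_solve text count) := by
  unfold Pre_solve; infer_instance
def pvWitness_solve : String × Int := ("abba", 3)

-- On non-uniform texts whose count-fold repetition contains two adjacent '!' — the text contains
-- '!!' (and count ≠ 0), or its leading and trailing '!'-runs are both odd so consecutive copies
-- abut in '!!' (except count = 1 with no '!!', where no copies abut) — A's greedy pass mistakes
-- real '!' for its own sentinel marks and returns an undercount of the changes; B returns the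
-- true minimal number of changes.
def D_solve (text : String) (count : Int) : Prop :=
  let l := text.toList
  let adj := (l.zipWith (fun a b => a == '!' && b == '!') l.tail).any id
  l.all (· == l.headD ' ') = false ∧
    ((adj = true ∧ count ≠ 0) ∨
      ((l.takeWhile (· == '!')).length % 2 = 1 ∧
        (l.reverse.takeWhile (· == '!')).length % 2 = 1 ∧
        (adj = true ∨ count ≠ 1)))
instance (text : String) (count : Int) : Decidable (D_solve text count) := by
  unfold D_solve; infer_instance

def Spec_solve (text : String) (count : Int) (out : Int) : Prop :=
  ¬ D_solve text count → out = solve_alt text count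
instance (text : String) (count : Int) (out : Int) : Decidable (Spec_solve text count out) := by
  unfold Spec_solve; infer_instance

def pvDiffWitness_solve : String × Int := ("a!!b", 1)
def pvDiffWitnessOut_solve : Int × Int := (0, 1)

-- ===== CLAIM (what is proved, stated in full; the proofs are below) =====
def Claim_unchanged_solve : Prop := ∀ (text : String) (count : Int), Dom_solve text count →
  Pre_solve text count → Spec_solve text count (solve text count)
def Claim_changed_solve : Prop := Dom_solve (pvDiffWitness_solve.1) (pvDiffWitness_solve.2) ∧
  Pre_solve (pvDiffWitness_solve.1) (pvDiffWitness_solve.2) ∧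
  D_solve (pvDiffWitness_solve.1) (pvDiffWitness_solve.2) ∧
  solve (pvDiffWitness_solve.1) (pvDiffWitness_solve.2) = pvDiffWitnessOut_solve.1 ∧
  solve_alt (pvDiffWitness_solve.1) (pvDiffWitness_solve.2) = pvDiffWitnessOut_solve.2 ∧
  pvDiffWitnessOut_solve.1 ≠ pvDiffWitnessOut_solve.2
def Claim_exact_solve : Prop := ∀ (text : String) (count : Int), Dom_solve text count →
  Pre_solve text count → D_solve text count → solve text count ≠ solve_alt text count

-- ===== LEMMAS AND PROOFS =====

-- `all chars equal?` — on a uniform text both programs take the all-same branch and agree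
def allEq : List Char → Bool
  | [] => true
  | c :: cs => cs.all (· == c)

-- `does the text contain two adjacent '!'?`
def hasBB : List Char → Bool
  | [] => false
  | [_] => false
  | c :: d :: t => (c = '!' && d = '!') || hasBB (d :: t)

-- length of the text's leading run of '!' characters
def leadBangs : List Char → Nat
  | [] => 0
  | c :: t => if c = '!' then leadBangs t + 1 else 0

/- ## Proof-side helpers: the exact amount by which A undercounts B -/

-- disjoint adjacent '!'-pairs, i.e. the total cost A's sentinel drops inside one copy
def bb : List Char → Int
  | [] => 0
  | [_] => 0
  | c :: d :: t => if c = '!' ∧ d = '!' then 1 + bb t else bb (d :: t)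

-- length of the leading run of '!'
def leadB : List Char → Int
  | [] => 0
  | c :: t => if c = '!' then 1 + leadB t else 0

-- how much A undercounts B, computed over the characters
def deltaOf (text : String) (count : Int) : Int :=
  let l := text.toList
  if allEq l then 0
  else if l.head? = some '!' ∧ l.getLast? = some '!' then
    let a := leadB l
    let b := leadB l.reverse
    count * (bb l - a / 2 - b / 2) + a / 2 + b / 2 + (count - 1) * ((a + b) / 2)
  else count * bb l

-- run-length structure of the input (proof-side)
def addRun (c : Char) (n : Int) : List (Char × Int) → List (Char × Int)
  | (d, m) :: r => if d = c then (c, n + m) :: r else (c, n) :: (d, m) :: r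
  | [] => [(c, n)]

def runsOf : List Char → List (Char × Int)
  | [] => []
  | c :: cs => addRun c 1 (runsOf cs)

def bangLoss : List (Char × Int) → Int
  | [] => 0
  | (c, n) :: rest => (if c = '!' then n / 2 else 0) + bangLoss rest

-- deltaOf, recomputed over the run-length structure
def deltaRuns (text : String) (count : Int) : Int :=
  let rs := runsOf text.toList
  if rs.length ≤ 1 then 0
  else
    let c0 := (rs.headD (' ', 0)).1
    let a := (rs.headD (' ', 0)).2
    let cl := (rs.getLastD (' ', 0)).1
    let b := (rs.getLastD (' ', 0)).2
    if cl ≠ c0 then count * bangLoss rs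
    else
      count * bangLoss rs.tail.dropLast +
        (if c0 = '!' then a / 2 + b / 2 + (count - 1) * ((a + b) / 2) else 0)


/- ## The greedy pass of `calc_changes`, as a pure recursion -/

-- state of A's marking loop: `p` is the (possibly marked) previous element
def gAux : Char → List Char → Int
  | _, [] => 0
  | p, c :: cs => if p = c ∧ p ≠ '!' then 1 + gAux '!' cs else gAux c cs

def gTot : List Char → Int
  | [] => 0
  | c :: cs => gAux c cs

theorem gAux_cons_pos (p c : Char) (cs : List Char) (h : p = c ∧ p ≠ '!') :
    gAux p (c :: cs) = 1 + gAux '!' cs := by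
  simp only [gAux]; rw [if_pos h]

theorem gAux_cons_neg (p c : Char) (cs : List Char) (h : ¬ (p = c ∧ p ≠ '!')) :
    gAux p (c :: cs) = gAux c cs := by
  simp only [gAux]; rw [if_neg h]

theorem gAux_bang (l : List Char) : gAux '!' l = gTot l := by
  cases l with
  | nil => rfl
  | cons c cs => rw [gTot, gAux_cons_neg]; simp

theorem calcGo_eq (k : Nat) : ∀ (part : List Char) (i : Nat) (change : Int),
    1 ≤ i → i + k = part.length →
    calcGo (List.range' i k) part change = change + gAux (part.getD (i-1) ' ') (part.drop i) := by
  induction k with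
  | zero =>
    intro part i change h1 h2
    have hd : part.drop i = [] := List.drop_eq_nil_of_le (by omega)
    simp [calcGo, hd, gAux]
  | succ k ih =>
    intro part i change h1 h2
    have hi : i < part.length := by omega
    rw [List.range'_succ]
    have hdrop : part.drop i = part[i] :: part.drop (i+1) := List.drop_eq_getElem_cons hi
    have hgd : part.getD i ' ' = part[i] := List.getD_eq_getElem part ' ' hi
    simp only [calcGo]
    rw [if_neg (by omega : ¬ i = 0)]
    by_cases hc : part.getD (i - 1) ' ' = part.getD i ' ' ∧ part.getD (i - 1) ' ' ≠ '!'
    · rw [if_pos hc]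
      have hlen : (i+1) + k = (part.set i '!').length := by simp [List.length_set]; omega
      rw [ih (part.set i '!') (i+1) (change+1) (by omega) hlen]
      have e1 : (part.set i '!').getD ((i+1)-1) ' ' = '!' := by
        have : i < (part.set i '!').length := by simp [List.length_set]; omega
        rw [Nat.add_sub_cancel, List.getD_eq_getElem _ ' ' this, List.getElem_set_self]
      have e2 : (part.set i '!').drop (i+1) = part.drop (i+1) := List.drop_set_of_lt (by omega)
      rw [e1, e2, hdrop, gAux_cons_pos _ _ _ (by rw [← hgd]; exact hc)]
      ring
    · rw [if_neg hc]
      rw [ih part (i+1) change (by omega) (by omega)]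
      rw [Nat.add_sub_cancel, hdrop, gAux_cons_neg _ _ _ (by rw [← hgd]; exact hc), hgd]

theorem calcChanges_eq (l : List Char) : calcChanges l = gTot l := by
  cases l with
  | nil => rfl
  | cons c cs =>
    unfold calcChanges
    rw [List.range_eq_range']
    have : (c :: cs).length = cs.length + 1 := rfl
    rw [this, List.range'_succ]
    simp only [calcGo, if_pos rfl]
    rw [calcGo_eq cs.length (c :: cs) 1 0 (by omega) (by rw [List.length_cons]; omega)]
    simp [gTot]

/- ## The greedy pass over a run -/

def hzN (c : Char) (m : Nat) : Int := if c = '!' then 0 else ((m / 2 : Nat) : Int)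

theorem gTot_bang (m : Nat) (rest : List Char) :
    gTot (List.replicate m '!' ++ rest) = gTot rest := by
  induction m with
  | zero => simp
  | succ m ih => rw [List.replicate_succ, List.cons_append, gTot, gAux_bang, ih]

theorem gAux_run (c : Char) (hc : c ≠ '!') (rest : List Char) (hr : rest.head? ≠ some c) :
    ∀ k, gAux c (List.replicate k c ++ rest) = (((k+1)/2 : Nat) : Int) + gTot rest := by
  intro k
  induction k using Nat.strong_induction_on with
  | _ k ih =>
    match k with
    | 0 =>
      cases rest with
      | nil => simp [gAux, gTot]
      | cons d ds =>
        have hne : c ≠ d := by intro h; exact hr (by simp [h])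
        rw [show List.replicate 0 c ++ (d :: ds) = d :: ds from rfl,
          gAux_cons_neg _ _ _ (by tauto), gTot]
        norm_num
    | 1 =>
      rw [show List.replicate 1 c ++ rest = c :: rest from rfl,
        gAux_cons_pos _ _ _ ⟨rfl, hc⟩, gAux_bang]
      norm_num
    | (k+2) =>
      rw [List.replicate_succ, List.cons_append,
        gAux_cons_pos _ _ _ ⟨rfl, hc⟩, gAux_bang, List.replicate_succ, List.cons_append,
        gTot, ih k (by omega)]
      have : ((k+2+1)/2 : Nat) = ((k+1)/2 : Nat) + 1 := by omega
      rw [this]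
      push_cast
      ring

theorem gTot_run (c : Char) (m : Nat) (hm : 1 ≤ m) (rest : List Char) (hr : rest.head? ≠ some c) :
    gTot (List.replicate m c ++ rest) = hzN c m + gTot rest := by
  obtain ⟨m', rfl⟩ : ∃ m', m = m' + 1 := ⟨m - 1, by omega⟩
  by_cases hc : c = '!'
  · subst hc; rw [gTot_bang]; simp [hzN]
  · rw [List.replicate_succ, List.cons_append, gTot, gAux_run c hc rest hr m']
    simp [hzN, hc]

/- ## Run-length structure: `runsOf` -/

def leadCount (c : Char) : List Char → Nat
  | [] => 0
  | x :: xs => if x = c then leadCount c xs + 1 else 0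

theorem leadCount_decomp (c : Char) : ∀ l : List Char,
    List.replicate (leadCount c l) c ++ l.drop (leadCount c l) = l := by
  intro l
  induction l with
  | nil => rfl
  | cons x xs ih =>
    by_cases h : x = c
    · subst h
      have e : leadCount x (x :: xs) = leadCount x xs + 1 := by simp [leadCount]
      rw [e, List.replicate_succ, List.cons_append, List.drop_succ_cons, ih]
    · simp [leadCount, h]

theorem leadCount_head (c : Char) : ∀ l : List Char,
    (l.drop (leadCount c l)).head? ≠ some c := by
  intro l
  induction l with
  | nil => simp [leadCount]
  | cons x xs ih =>
    by_cases h : x = c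
    · subst h
      have e : leadCount x (x :: xs) = leadCount x xs + 1 := by simp [leadCount]
      rw [e, List.drop_succ_cons]; exact ih
    · have e : leadCount c (x :: xs) = 0 := by simp [leadCount, h]
      rw [e]; simpa using h

theorem addRun_ne_nil (c : Char) (n : Int) (rs : List (Char × Int)) : addRun c n rs ≠ [] := by
  match rs with
  | [] => simp [addRun]
  | (d, m) :: r => simp only [addRun]; split <;> simp

theorem runsOf_ne_nil (l : List Char) (h : l ≠ []) : runsOf l ≠ [] := by
  match l with
  | c :: cs => exact addRun_ne_nil c 1 (runsOf cs)

theorem addRun_head_fst (c : Char) (n : Int) (rs : List (Char × Int)) :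
    ((addRun c n rs).head?).map Prod.fst = some c := by
  match rs with
  | [] => simp [addRun]
  | (d, m) :: r => simp only [addRun]; split <;> simp

theorem addRun_of_head_ne (c : Char) (n : Int) (d : Char) (rs : List (Char × Int))
    (h : rs.head?.map Prod.fst = some d) (hne : d ≠ c) : addRun c n rs = (c, n) :: rs := by
  match rs with
  | [] => simp at h
  | (e, m) :: r =>
    simp only [List.head?_cons, Option.map_some] at h
    have : e = d := by simpa using congrArg (fun o => o) h
    subst this
    simp only [addRun]
    rw [if_neg hne]

theorem addRun_addRun (c : Char) (n : Int) (rs : List (Char × Int)) :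
    addRun c n (addRun c 1 rs) = addRun c (n+1) rs := by
  match rs with
  | [] =>
    simp [addRun]
  | (d, m) :: r =>
    by_cases h : d = c
    · subst h
      have e1 : addRun d 1 ((d, m) :: r) = (d, 1 + m) :: r := by simp [addRun]
      rw [e1]
      simp [addRun]
      omega
    · have e1 : addRun c 1 ((d, m) :: r) = (c, 1) :: (d, m) :: r := by simp [addRun, h]
      rw [e1]
      simp [addRun, h]

theorem addRun_append (c : Char) (n : Int) (rs tail : List (Char × Int)) (h : rs ≠ []) :
    addRun c n (rs ++ tail) = addRun c n rs ++ tail := by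
  match rs with
  | (d, m) :: r =>
    simp only [List.cons_append, addRun]
    split <;> simp

theorem addRun_getLast_fst (c : Char) (n : Int) (rs : List (Char × Int)) (h : rs ≠ []) :
    ((addRun c n rs).getLast?).map Prod.fst = (rs.getLast?).map Prod.fst := by
  match rs with
  | (d, m) :: r =>
    by_cases hdc : d = c
    · subst hdc
      simp only [addRun, if_pos rfl]
      cases r with
      | nil => simp
      | cons y ys => simp [List.getLast?_cons_cons]
    · simp only [addRun, if_neg hdc]
      simp [List.getLast?_cons_cons]

theorem runsOf_head_fst (l : List Char) (h : l ≠ []) :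
    (runsOf l).head?.map Prod.fst = l.head? := by
  match l with
  | c :: cs => rw [runsOf, addRun_head_fst]; rfl

theorem runsOf_getLast_fst (l : List Char) (h : l ≠ []) :
    (runsOf l).getLast?.map Prod.fst = l.getLast? := by
  induction l with
  | nil => simp at h
  | cons c cs ih =>
    cases hcs : cs with
    | nil => simp [runsOf, addRun]
    | cons y ys =>
      subst hcs
      rw [runsOf, addRun_getLast_fst _ _ _ (runsOf_ne_nil _ (by simp)), ih (by simp),
        List.getLast?_cons_cons]

theorem runsOf_replicate (c : Char) : ∀ n : Nat,
    runsOf (List.replicate n c) = if n = 0 then [] else [(c, (n : Int))] := by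
  intro n
  induction n with
  | zero => rfl
  | succ n ih =>
    rw [List.replicate_succ, runsOf, ih]
    by_cases h : n = 0
    · subst h; simp [addRun]
    · rw [if_neg h, if_neg (by omega)]
      simp [addRun]
      omega

theorem runsOf_replicate_append (c : Char) (rest : List Char) (hr : rest.head? ≠ some c) :
    ∀ a : Nat, a ≠ 0 → runsOf (List.replicate a c ++ rest) = (c, (a : Int)) :: runsOf rest := by
  intro a
  induction a with
  | zero => omega
  | succ a ih =>
    intro _
    rw [List.replicate_succ, List.cons_append, runsOf]
    by_cases ha : a = 0
    · subst ha
      simp only [List.replicate, List.nil_append]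
      cases hrest : rest with
      | nil => simp [runsOf, addRun]
      | cons d ds =>
        have hd : d ≠ c := by intro h; apply hr; simp [hrest, h]
        rw [addRun_of_head_ne c 1 d _ (by rw [← hrest, runsOf_head_fst rest (by simp [hrest]), hrest]; rfl) hd]
        norm_num
    · rw [ih ha]
      have e : addRun c 1 ((c, (a : Int)) :: runsOf rest) = (c, 1 + (a : Int)) :: runsOf rest := by
        simp [addRun]
      rw [e]
      simp
      omega

theorem runsOf_append_replicate (c : Char) (b : Nat) (hb : b ≠ 0) :
    ∀ mid : List Char, mid.getLast? ≠ some c →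
      runsOf (mid ++ List.replicate b c) = runsOf mid ++ [(c, (b : Int))] := by
  intro mid
  induction mid with
  | nil =>
    intro _
    rw [List.nil_append, runsOf_replicate, if_neg hb]
    rfl
  | cons x xs ih =>
    intro hm
    cases hxs : xs with
    | nil =>
      subst hxs
      have hx : x ≠ c := by simpa using hm
      rw [List.cons_append, List.nil_append, runsOf,
        runsOf_replicate, if_neg hb,
        addRun_of_head_ne x 1 c _ (by simp) (fun h => hx h.symm)]
      simp [runsOf, addRun]
    | cons y ys =>
      subst hxs
      have hlast : (y :: ys).getLast? ≠ some c := by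
        rwa [List.getLast?_cons_cons] at hm
      rw [List.cons_append,
        show runsOf (x :: ((y :: ys) ++ List.replicate b c))
          = addRun x 1 (runsOf ((y :: ys) ++ List.replicate b c)) from rfl,
        ih hlast, addRun_append x 1 _ _ (runsOf_ne_nil _ (by simp))]
      rfl

/- ## Port B's fold builds `runsOf` -/

theorem rleStep_concat (rs : List (Char × Int)) (c : Char) (n : Int) (x : Char) :
    rleStep (rs ++ [(c, n)]) x =
      if c = x then rs ++ [(x, n+1)] else (rs ++ [(c, n)]) ++ [(x, 1)] := by
  unfold rleStep
  rw [List.getLast?_concat]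
  simp [List.dropLast_concat]

theorem foldl_rleStep (cs : List Char) : ∀ (rs : List (Char × Int)) (c : Char) (n : Int),
    List.foldl rleStep (rs ++ [(c, n)]) cs = rs ++ addRun c n (runsOf cs) := by
  induction cs with
  | nil => intro rs c n; simp [runsOf, addRun]
  | cons x xs ih =>
    intro rs c n
    rw [List.foldl_cons, rleStep_concat]
    by_cases h : c = x
    · subst h
      rw [if_pos rfl, ih, runsOf, addRun_addRun]
    · rw [if_neg h, ih, runsOf,
        addRun_of_head_ne c n x _ (addRun_head_fst x 1 (runsOf xs)) (fun hh => h hh.symm)]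
      simp

theorem foldl_runs (l : List Char) : l.foldl rleStep [] = runsOf l := by
  cases l with
  | nil => rfl
  | cons c cs =>
    rw [List.foldl_cons]
    have e : rleStep [] c = [] ++ [(c, 1)] := rfl
    rw [e, foldl_rleStep, runsOf]
    rfl

/- ## A's index-search loops -/

theorem findDiff_replicate (c : Char) (n : Nat) : ∀ i, findDiff c (List.replicate n c) i = -1 := by
  induction n with
  | zero => intro i; rfl
  | succ n ih => intro i; rw [List.replicate_succ, findDiff, if_pos rfl]; exact ih (i+1)

theorem findDiff_run (c d : Char) (hd : d ≠ c) (r : List Char) (n : Nat) :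
    ∀ i, findDiff c (List.replicate n c ++ d :: r) i = i + n := by
  induction n with
  | zero =>
    intro i
    rw [show List.replicate 0 c ++ d :: r = d :: r from rfl, findDiff, if_neg hd]
    simp
  | succ n ih =>
    intro i
    rw [List.replicate_succ, List.cons_append, findDiff, if_pos rfl, ih (i+1)]
    push_cast; ring

theorem findMid_run (P : List Char) (c : Char) (B : Nat) (stop : Int)
    (hP : P.getLast? ≠ some c) (hstop : 0 ≤ stop) (hlen : stop + 2 ≤ (P.length : Int)) :
    ∀ b, b ≤ B → findMidGo (P ++ List.replicate B c) c
      (PySem.List.pyRange ((P.length : Int) + b - 1) stop (-1)) = (P.length : Int) := by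
  intro b
  induction b with
  | zero =>
    intro _
    simp only [Nat.cast_zero]
    have hcons : stop < (P.length : Int) + 0 - 1 := by omega
    rw [PySem.List.pyRange_neg_one_cons hcons, findMidGo]
    have hidx : (P.length : Int) + 0 - 1 = ((P.length - 1 : Nat) : Int) := by
      have : 1 ≤ P.length := by omega
      push_cast [this]; ring
    obtain ⟨e, he⟩ : ∃ e, P.getLast? = some e := by
      cases hpl : P.getLast? with
      | none => rw [List.getLast?_eq_none_iff] at hpl; subst hpl; simp at hlen; omega
      | some e => exact ⟨e, rfl⟩
    have hget : PySem.List.pyGet? (P ++ List.replicate B c) ((P.length : Int) + 0 - 1) = some e := by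
      rw [hidx, PySem.List.pyGet?_natCast, List.getElem?_append_left (by omega),
        ← List.getLast?_eq_getElem?, he]
    rw [hget]
    have hec : e ≠ c := fun h => hP (h ▸ he)
    simp only [Option.getD_some]
    rw [if_neg hec]
    omega
  | succ b ih =>
    intro hbB
    simp only [Nat.cast_add, Nat.cast_one]
    have hcons : stop < (P.length : Int) + ((b : Int) + 1) - 1 := by omega
    rw [PySem.List.pyRange_neg_one_cons hcons, findMidGo]
    have hidx : (P.length : Int) + ((b : Int) + 1) - 1 = ((P.length + b : Nat) : Int) := by
      push_cast; ring
    have hget : PySem.List.pyGet? (P ++ List.replicate B c) ((P.length : Int) + ((b : Int) + 1) - 1)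
        = some c := by
      rw [hidx, PySem.List.pyGet?_natCast, List.getElem?_append_right (by omega)]
      simp only [Nat.add_sub_cancel_left]
      rw [List.getElem?_replicate, if_pos (by omega)]
    rw [hget]
    simp only [Option.getD_some, if_pos rfl]
    have harg : (P.length : Int) + ((b : Int) + 1) - 1 - 1 = (P.length : Int) + b - 1 := by ring
    rw [harg, ih (by omega)]
    simp

/- ## Canonical decomposition of a non-uniform list -/

theorem decomp (l : List Char) (h : l ≠ []) :
    (∃ n c, 1 ≤ n ∧ l = List.replicate n c) ∨
    (∃ (c0 : Char) (a b : Nat) (mid : List Char), 1 ≤ a ∧ mid ≠ [] ∧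
      mid.head? ≠ some c0 ∧ mid.getLast? ≠ some c0 ∧ l.head? = some c0 ∧
      l = List.replicate a c0 ++ mid ++ List.replicate b c0) := by
  obtain ⟨c0, t, rfl⟩ : ∃ c0 t, l = c0 :: t := by
    cases l with
    | nil => exact absurd rfl h
    | cons x xs => exact ⟨x, xs, rfl⟩
  set a := leadCount c0 (c0 :: t) with ha
  have ha1 : 1 ≤ a := by simp [ha, leadCount]
  have hdec := leadCount_decomp c0 (c0 :: t)
  have hhead := leadCount_head c0 (c0 :: t)
  set rest := (c0 :: t).drop a with hrest
  by_cases hre : rest = []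
  · left
    exact ⟨a, c0, ha1, by rw [← hdec, hre, List.append_nil]⟩
  · right
    set b := leadCount c0 rest.reverse with hb
    have hdec2 := leadCount_decomp c0 rest.reverse
    have hhead2 := leadCount_head c0 rest.reverse
    set mid := (rest.reverse.drop b).reverse with hmid
    have hrev : rest = mid ++ List.replicate b c0 := by
      have : rest.reverse = List.replicate b c0 ++ rest.reverse.drop b := hdec2.symm
      calc rest = rest.reverse.reverse := (List.reverse_reverse rest).symm
        _ = (List.replicate b c0 ++ rest.reverse.drop b).reverse := by rw [← this]
        _ = mid ++ List.replicate b c0 := by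
            rw [List.reverse_append, List.reverse_replicate, hmid]
    have hmlast : mid.getLast? ≠ some c0 := by
      rw [hmid, List.getLast?_reverse]; exact hhead2
    have hmne : mid ≠ [] := by
      intro hm
      rw [hm, List.nil_append] at hrev
      have hb1 : b ≠ 0 := by
        intro h0; rw [h0] at hrev; simp at hrev; exact hre hrev
      apply hhead
      obtain ⟨b', hb'⟩ := Nat.exists_eq_succ_of_ne_zero hb1
      rw [hrev, hb', List.replicate_succ]
      rfl
    have hmhead : mid.head? ≠ some c0 := by
      intro hh
      apply hhead
      rw [hrev, List.head?_append_of_ne_nil _ hmne]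
      exact hh
    exact ⟨c0, a, b, mid, ha1, hmne, hmhead, hmlast, rfl,
      by rw [List.append_assoc, ← hrev, hdec]⟩

/- ## Sums over run lists -/

def hs : List (Char × Int) → Int
  | [] => 0
  | (_, n) :: r => n / 2 + hs r

def bhs : List (Char × Int) → Int
  | [] => 0
  | (c, n) :: r => (if c = '!' then 0 else n / 2) + bhs r

theorem hs_append (xs ys : List (Char × Int)) : hs (xs ++ ys) = hs xs + hs ys := by
  induction xs with
  | nil => simp [hs]
  | cons p r ih => obtain ⟨c, n⟩ := p; rw [List.cons_append, hs, ih, hs]; ring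

theorem bangLoss_append (xs ys : List (Char × Int)) :
    bangLoss (xs ++ ys) = bangLoss xs + bangLoss ys := by
  induction xs with
  | nil => simp [bangLoss]
  | cons p r ih => obtain ⟨c, n⟩ := p; rw [List.cons_append, bangLoss, ih, bangLoss]; ring

theorem bhs_eq (rs : List (Char × Int)) : bhs rs = hs rs - bangLoss rs := by
  induction rs with
  | nil => simp [bhs, hs, bangLoss]
  | cons p r ih =>
    obtain ⟨c, n⟩ := p
    rw [bhs, hs, bangLoss, ih]
    by_cases h : c = '!' <;> simp [h] <;> ring

theorem hs_eq_map_sum (rs : List (Char × Int)) :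
    (rs.map (fun p => PySem.Int.floordiv p.2 2)).sum = hs rs := by
  induction rs with
  | nil => rfl
  | cons p r ih =>
    obtain ⟨c, n⟩ := p
    rw [List.map_cons, List.sum_cons, ih, hs,
      PySem.Int.floordiv_eq_ediv_of_pos (by omega)]

/- ## The greedy total equals the '!'-zeroed half-sum of the runs -/

theorem gTot_runs (l : List Char) : gTot l = bhs (runsOf l) := by
  induction hn : l.length using Nat.strong_induction_on generalizing l with
  | _ n ih =>
    cases l with
    | nil => simp [gTot, runsOf, bhs]
    | cons c cs =>
      have ha1 : 1 ≤ leadCount c (c :: cs) := by simp [leadCount]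
      have hdec := leadCount_decomp c (c :: cs)
      have hhead := leadCount_head c (c :: cs)
      have hlen : leadCount c (c :: cs) + ((c :: cs).drop (leadCount c (c :: cs))).length
          = (c :: cs).length := by
        conv_rhs => rw [← hdec]
        simp
      rw [List.length_cons] at hn
      rw [← hdec, gTot_run c _ ha1 _ hhead,
        runsOf_replicate_append c _ hhead _ (by omega), bhs,
        ih ((c :: cs).drop (leadCount c (c :: cs))).length
          (by rw [List.length_cons] at hlen; omega) _ rfl]
      have e : hzN c (leadCount c (c :: cs))
          = if c = '!' then 0 else ((leadCount c (c :: cs) : Int) / 2) := by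
        simp only [hzN]
        by_cases h : c = '!'
        · simp [h]
        · simp only [if_neg h]
          omega
      rw [e]

/- ## Assembly: the two shapes of a nonempty text -/

theorem master_uniform (text : String) (count : Int) (n : Nat) (c0 : Char) (hn : 1 ≤ n)
    (hl : text.toList = List.replicate n c0) :
    solve text count = solve_alt text count - deltaRuns text count := by
  have hrn : runsOf (List.replicate n c0) = [(c0, (n : Int))] := by
    rw [runsOf_replicate, if_neg (by omega)]
  simp only [solve, solve_alt, deltaRuns, hl, foldl_runs, hrn]
  rw [if_pos (by simp : ([(c0, (n : Int))] : List (Char × Int)).length ≤ 1)]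
  rw [if_pos (by simp : ([(c0, (n : Int))] : List (Char × Int)).length ≤ 1)]
  by_cases h1 : n = 1
  · subst h1
    rw [if_pos (by simp)]
    norm_num
  · rw [if_neg (by simp; omega)]
    have hhd : (List.replicate n c0).headD ' ' = c0 := by
      obtain ⟨n', rfl⟩ : ∃ n', n = n' + 1 := ⟨n - 1, by omega⟩
      rw [List.replicate_succ, List.headD_cons]
    rw [hhd, findDiff_replicate, if_pos rfl]
    omega

theorem master_split (text : String) (count : Int) (c0 : Char) (a b : Nat) (mid : List Char)
    (ha1 : 1 ≤ a) (hmne : mid ≠ []) (hmhead : mid.head? ≠ some c0)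
    (hmlast : mid.getLast? ≠ some c0)
    (hl : text.toList = List.replicate a c0 ++ mid ++ List.replicate b c0) :
    solve text count = solve_alt text count - deltaRuns text count := by
  obtain ⟨d, mid', rfl⟩ : ∃ d mid', mid = d :: mid' := by
    cases mid with
    | nil => exact absurd rfl hmne
    | cons x xs => exact ⟨x, xs, rfl⟩
  have hd : d ≠ c0 := by simpa using hmhead
  set L := List.replicate a c0 ++ (d :: mid') ++ List.replicate b c0 with hL
  set m := (d :: mid').length with hm
  have hm1 : 1 ≤ m := by simp [hm]
  have hPlen : (List.replicate a c0 ++ (d :: mid')).length = a + m := by simp [hm]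
  have hLlen : L.length = a + m + b := by simp [hL, hm]; omega
  have hlen1 : ¬ (L.length = 1) := by omega
  have hheadD : L.headD ' ' = c0 := by
    obtain ⟨a', rfl⟩ : ∃ a', a = a' + 1 := ⟨a - 1, by omega⟩
    rw [hL, List.replicate_succ, List.cons_append, List.cons_append, List.headD_cons]
  have hFD : findDiff c0 L 0 = (a : Int) := by
    rw [hL, List.append_assoc, List.cons_append, findDiff_run c0 d hd _ a 0, zero_add]
  have hFDne : ¬ ((a : Int) = -1) := by omega
  have hPlast : (List.replicate a c0 ++ (d :: mid')).getLast? ≠ some c0 := by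
    obtain ⟨p, hp⟩ := Option.isSome_iff_exists.mp
      (List.getLast?_isSome.mpr (by simp) : (d :: mid').getLast?.isSome)
    rw [List.getLast?_append, hp]
    simp only [Option.some_or]
    rw [← hp]
    exact hmlast
  have hFM : findMidGo L c0 (PySem.List.pyRange ((L.length : Int) - 1) ((a : Int) - 1) (-1))
      = ((a + m : Nat) : Int) := by
    have harg : (L.length : Int) - 1
        = (((List.replicate a c0 ++ (d :: mid')).length : Int) + (b : Int) - 1) := by
      rw [hLlen, hPlen]; push_cast; ring
    rw [harg, ← hPlen,
      findMid_run (List.replicate a c0 ++ (d :: mid')) c0 b ((a : Int) - 1) hPlast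
        (by omega) (by rw [hPlen]; push_cast; omega) b le_rfl]
  have hfirstS : PySem.List.slice L none (some (a : Int)) = List.replicate a c0 := by
    rw [PySem.List.slice_to_natCast, hL, List.append_assoc,
      List.take_left' (by simp)]
  have hmidS : PySem.List.slice L (some (a : Int)) (some ((a + m : Nat) : Int)) = d :: mid' := by
    rw [PySem.List.slice_natCast, hL, List.append_assoc, List.drop_left' (by simp),
      show a + m - a = m from by omega, hm, List.take_left' rfl]
  have hendS : PySem.List.slice L (some ((a + m : Nat) : Int)) none = List.replicate b c0 := by
    rw [PySem.List.slice_from_natCast, hL, List.drop_left' (by rw [hPlen])]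
  have cRep : ∀ k : Nat, calcChanges (List.replicate k c0) = hzN c0 k := by
    intro k
    cases k with
    | zero => simp [calcChanges, calcGo, hzN]
    | succ k' =>
      rw [calcChanges_eq, ← List.append_nil (List.replicate (k'+1) c0),
        gTot_run c0 (k'+1) (by omega) [] (by simp)]
      simp [gTot]
  have cMid : calcChanges (d :: mid') = bhs (runsOf (d :: mid')) := by
    rw [calcChanges_eq, gTot_runs]
  have cJoint : calcChanges (List.replicate b c0 ++ List.replicate a c0) = hzN c0 (b + a) := by
    rw [← List.replicate_add, cRep]
  have hcast : ∀ k : Nat, ((k / 2 : Nat) : Int) = (k : Int) / 2 := by intro k; omega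
  have hfd : ∀ x : Int, PySem.Int.floordiv x 2 = x / 2 := fun x =>
    PySem.Int.floordiv_eq_ediv_of_pos (by omega)
  have hRne : runsOf (d :: mid') ≠ [] := runsOf_ne_nil _ (by simp)
  by_cases hb : b = 0
  · -- no trailing run of the first character
    subst hb
    have hRuns : runsOf L = (c0, (a : Int)) :: runsOf (d :: mid') := by
      rw [hL, show List.replicate 0 c0 = ([] : List Char) from rfl, List.append_nil,
        runsOf_replicate_append c0 _ hmhead a (by omega)]
    obtain ⟨e, k, hek⟩ : ∃ e k, (runsOf (d :: mid')).getLast? = some (e, k) := by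
      obtain ⟨⟨e, k⟩, hp⟩ := List.getLast?_isSome.mpr hRne |> Option.isSome_iff_exists.mp
      exact ⟨e, k, hp⟩
    have he : e ≠ c0 := by
      intro hec
      apply hmlast
      rw [← runsOf_getLast_fst _ (by simp : (d :: mid') ≠ []), hek, hec]
      rfl
    have hgl : ((c0, (a : Int)) :: runsOf (d :: mid')).getLastD (' ', 0) = (e, k) := by
      obtain ⟨r0, R', hR⟩ : ∃ r0 R', runsOf (d :: mid') = r0 :: R' := by
        cases hRR : runsOf (d :: mid') with
        | nil => exact absurd hRR hRne
        | cons x xs => exact ⟨x, xs, rfl⟩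
      rw [hR, List.getLastD_eq_getLast?, List.getLast?_cons_cons, ← hR, hek]
      rfl
    have hlen2 : ¬ (((c0, (a : Int)) :: runsOf (d :: mid')).length ≤ 1) := by
      obtain ⟨r0, R', hR⟩ : ∃ r0 R', runsOf (d :: mid') = r0 :: R' := by
        cases hRR : runsOf (d :: mid') with
        | nil => exact absurd hRR hRne
        | cons x xs => exact ⟨x, xs, rfl⟩
      simp [hR]
    simp only [solve, solve_alt, deltaRuns, hl, foldl_runs]
    rw [← hL, hRuns] at *
    rw [if_neg hlen1, if_neg hlen2, if_neg hlen2, hheadD, hFD, if_neg hFDne, hFM,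
      hfirstS, hmidS, hendS, hgl]
    simp only [List.headD_cons]
    rw [if_pos (by simpa using fun hh : c0 = e => he hh.symm)]
    rw [if_pos (by simpa using fun hh : e = c0 => he hh)]
    simp only [show List.replicate 0 c0 = ([] : List Char) from rfl, List.nil_append,
      List.append_nil]
    rw [cRep, cMid, show calcChanges ([] : List Char) = 0 from rfl,
      hs_eq_map_sum, hs, bhs_eq, bangLoss]
    simp only [hfd, hzN]
    by_cases hc0 : c0 = '!'
    · simp only [if_pos hc0]
      ring
    · simp only [if_neg hc0]
      rw [hcast a]
      ring
  · -- the first and last runs have the same character c0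
    have hb1 : b ≠ 0 := hb
    have hRuns : runsOf L = (c0, (a : Int)) :: (runsOf (d :: mid') ++ [(c0, (b : Int))]) := by
      rw [hL, List.append_assoc, runsOf_replicate_append c0 _
          (by rw [List.head?_append_of_ne_nil _ (by simp)]; exact hmhead) a (by omega),
        runsOf_append_replicate c0 b hb1 _ hmlast]
    have hgl : ((c0, (a : Int)) :: (runsOf (d :: mid') ++ [(c0, (b : Int))])).getLastD (' ', 0)
        = (c0, (b : Int)) := by
      rw [List.getLastD_eq_getLast?, ← List.cons_append, List.getLast?_concat]
      rfl
    have hlen2 : ¬ (((c0, (a : Int)) :: (runsOf (d :: mid') ++ [(c0, (b : Int))])).length ≤ 1) := by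
      simp
    simp only [solve, solve_alt, deltaRuns, hl, foldl_runs]
    rw [← hL, hRuns] at *
    rw [if_neg hlen1, if_neg hlen2, if_neg hlen2, hheadD, hFD, if_neg hFDne, hFM,
      hfirstS, hmidS, hendS, hgl]
    simp only [List.headD_cons]
    rw [if_neg (by simp)]
    rw [if_neg (by simp)]
    rw [cRep, cMid, cJoint, cRep,
      hs_eq_map_sum, hs, hs_append, hs,
      show List.tail ((c0, (a : Int)) :: (runsOf (d :: mid') ++ [(c0, (b : Int))]))
        = runsOf (d :: mid') ++ [(c0, (b : Int))] from rfl,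
      List.dropLast_concat, bhs_eq]
    simp only [hs, hfd, hzN]
    by_cases hc0 : c0 = '!'
    · simp only [if_pos hc0]
      ring
    · simp only [if_neg hc0]
      rw [hcast a, hcast b, hcast (b + a),
        show ((b + a : Nat) : Int) = (a : Int) + (b : Int) from by push_cast; ring]
      ring

-- The master lemma everything reduces to:
theorem solve_eq_alt_sub_delta (text : String) (count : Int) (h : text.toList ≠ []) :
    solve text count = solve_alt text count - deltaRuns text count := by
  rcases decomp text.toList h with ⟨n, c0, hn1, hl⟩ |
    ⟨c0, a, b, mid, ha1, hmne, hmhead, hmlast, _, hl⟩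
  · exact master_uniform text count n c0 hn1 hl
  · exact master_split text count c0 a b mid ha1 hmne hmhead hmlast hl

/- ## The char-level deltaOf equals the run-level deltaRuns -/

theorem allEq_replicate (n : Nat) (c : Char) : allEq (List.replicate n c) = true := by
  cases n with
  | zero => rfl
  | succ n =>
    rw [List.replicate_succ]
    simp only [allEq, List.all_eq_true]
    intro x hx
    simp [List.eq_of_mem_replicate hx]

theorem bb_cons_cons (c d : Char) (t : List Char) :
    bb (c :: d :: t) = if c = '!' ∧ d = '!' then 1 + bb t else bb (d :: t) := by
  simp [bb]

theorem bb_cons_ne (c : Char) (hc : c ≠ '!') (t : List Char) : bb (c :: t) = bb t := by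
  cases t with
  | nil => rfl
  | cons d r => rw [bb_cons_cons, if_neg (by tauto)]

theorem bb_nonbang_run (c : Char) (hc : c ≠ '!') (rest : List Char) :
    ∀ a, bb (List.replicate a c ++ rest) = bb rest := by
  intro a
  induction a with
  | zero => rfl
  | succ a ih => rw [List.replicate_succ, List.cons_append, bb_cons_ne c hc, ih]

theorem bb_bang_run (rest : List Char) (hr : rest.head? ≠ some '!') :
    ∀ a, bb (List.replicate a '!' ++ rest) = ((a / 2 : Nat) : Int) + bb rest := by
  intro a
  induction a using Nat.strong_induction_on with
  | _ a ih =>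
    match a with
    | 0 => simp
    | 1 =>
      rw [show List.replicate 1 '!' ++ rest = '!' :: rest from rfl]
      cases rest with
      | nil => simp [bb]
      | cons r rs =>
        have : r ≠ '!' := by intro h; exact hr (by simp [h])
        rw [bb_cons_cons, if_neg (by tauto)]
        norm_num
    | (a+2) =>
      rw [List.replicate_succ, List.replicate_succ, List.cons_append, List.cons_append,
        bb_cons_cons, if_pos ⟨rfl, rfl⟩, ih a (by omega)]
      have : ((a+2)/2 : Nat) = (a/2 : Nat) + 1 := by omega
      rw [this]
      push_cast
      ring

theorem bb_runs (l : List Char) : bb l = bangLoss (runsOf l) := by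
  induction hn : l.length using Nat.strong_induction_on generalizing l with
  | _ n ih =>
    cases l with
    | nil => simp [bb, runsOf, bangLoss]
    | cons c cs =>
      have ha1 : 1 ≤ leadCount c (c :: cs) := by simp [leadCount]
      have hdec := leadCount_decomp c (c :: cs)
      have hhead := leadCount_head c (c :: cs)
      have hlen : leadCount c (c :: cs) + ((c :: cs).drop (leadCount c (c :: cs))).length
          = (c :: cs).length := by
        conv_rhs => rw [← hdec]
        simp
      rw [List.length_cons] at hn
      have hih := ih ((c :: cs).drop (leadCount c (c :: cs))).length
        (by rw [List.length_cons] at hlen; omega) ((c :: cs).drop (leadCount c (c :: cs))) rfl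
      rw [← hdec, runsOf_replicate_append c _ hhead _ (by omega), bangLoss]
      by_cases hc : c = '!'
      · subst hc
        rw [bb_bang_run _ hhead, hih, if_pos rfl]
        have : ((leadCount '!' ('!' :: cs) / 2 : Nat) : Int)
            = ((leadCount '!' ('!' :: cs) : Nat) : Int) / 2 := by omega
        rw [this]
      · rw [bb_nonbang_run c hc, hih, if_neg hc]
        ring

theorem leadB_of_head_ne (l : List Char) (h : l.head? ≠ some '!') : leadB l = 0 := by
  cases l with
  | nil => rfl
  | cons c t =>
    have : c ≠ '!' := by intro hc; exact h (by simp [hc])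
    simp [leadB, this]

theorem leadB_bang_run (rest : List Char) (hr : rest.head? ≠ some '!') :
    ∀ a : Nat, leadB (List.replicate a '!' ++ rest) = (a : Int) := by
  intro a
  induction a with
  | zero => simpa using leadB_of_head_ne rest hr
  | succ a ih =>
    rw [List.replicate_succ, List.cons_append]
    simp only [leadB, if_pos rfl]
    rw [ih]
    push_cast
    ring

theorem delta_eq (text : String) (count : Int) : deltaOf text count = deltaRuns text count := by
  by_cases hnil : text.toList = []
  · simp [deltaOf, deltaRuns, hnil, runsOf, allEq]
  rcases decomp text.toList hnil with ⟨n, c0, hn1, hl⟩ |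
    ⟨c0, a, b, mid, ha1, hmne, hmhead, hmlast, hlh, hl⟩
  · have hr2 : runsOf (List.replicate n c0) = [(c0, (n : Int))] := by
      rw [runsOf_replicate, if_neg (by omega)]
    simp [deltaOf, deltaRuns, hl, hr2, allEq_replicate]
  · obtain ⟨d, mid', rfl⟩ : ∃ d mid', mid = d :: mid' := by
      cases mid with
      | nil => exact absurd rfl hmne
      | cons x xs => exact ⟨x, xs, rfl⟩
    have hd : d ≠ c0 := by simpa using hmhead
    obtain ⟨t, ht⟩ : ∃ t, text.toList = c0 :: t := by
      cases hv : text.toList with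
      | nil => rw [hv] at hlh; simp at hlh
      | cons x xs =>
        rw [hv, List.head?_cons] at hlh
        have hx : x = c0 := by simpa using hlh
        subst hx
        exact ⟨xs, rfl⟩
    have hdt : d ∈ t := by
      have hdl : d ∈ text.toList := by rw [hl]; simp
      rw [ht] at hdl
      rcases List.mem_cons.mp hdl with h | h
      · exact absurd h hd
      · exact h
    have hne : allEq text.toList = false := by
      rw [ht]
      simp only [allEq]
      exact List.all_eq_false.mpr ⟨d, hdt, by simp [hd]⟩
    have hRne : runsOf (d :: mid') ≠ [] := runsOf_ne_nil _ (by simp)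
    have hbbr := bb_runs text.toList
    by_cases hb : b = 0
    · -- last character differs from the first: the non-merge branch on both sides
      subst hb
      have hl' : text.toList = List.replicate a c0 ++ (d :: mid') := by
        rw [hl, show List.replicate 0 c0 = ([] : List Char) from rfl, List.append_nil]
      have hRuns : runsOf text.toList = (c0, (a : Int)) :: runsOf (d :: mid') := by
        rw [hl', runsOf_replicate_append c0 _ hmhead a (by omega)]
      obtain ⟨e, k, hek⟩ : ∃ e k, (runsOf (d :: mid')).getLast? = some (e, k) := by
        obtain ⟨⟨e, k⟩, hp⟩ := List.getLast?_isSome.mpr hRne |> Option.isSome_iff_exists.mp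
        exact ⟨e, k, hp⟩
      have he : e ≠ c0 := by
        intro hec
        apply hmlast
        rw [← runsOf_getLast_fst _ (by simp : (d :: mid') ≠ []), hek, hec]
        rfl
      obtain ⟨e0, he0⟩ : ∃ e0, (d :: mid').getLast? = some e0 := by
        obtain ⟨e0, hp⟩ := Option.isSome_iff_exists.mp
          (List.getLast?_isSome.mpr (by simp) : (d :: mid').getLast?.isSome)
        exact ⟨e0, hp⟩
      have he0c : e0 ≠ c0 := by intro h; exact hmlast (h ▸ he0)
      have hlast : text.toList.getLast? = some e0 := by
        rw [hl', List.getLast?_append, he0]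
        simp
      have hgl : ((c0, (a : Int)) :: runsOf (d :: mid')).getLastD (' ', 0) = (e, k) := by
        obtain ⟨r0, R', hR⟩ : ∃ r0 R', runsOf (d :: mid') = r0 :: R' := by
          cases hRR : runsOf (d :: mid') with
          | nil => exact absurd hRR hRne
          | cons x xs => exact ⟨x, xs, rfl⟩
        rw [hR, List.getLastD_eq_getLast?, List.getLast?_cons_cons, ← hR, hek]
        rfl
      have hlen2 : ¬ (((c0, (a : Int)) :: runsOf (d :: mid')).length ≤ 1) := by
        obtain ⟨r0, R', hR⟩ : ∃ r0 R', runsOf (d :: mid') = r0 :: R' := by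
          cases hRR : runsOf (d :: mid') with
          | nil => exact absurd hRR hRne
          | cons x xs => exact ⟨x, xs, rfl⟩
        simp [hR]
      have hmerge : ¬ (text.toList.head? = some '!' ∧ text.toList.getLast? = some '!') := by
        rintro ⟨h1, h2⟩
        rw [hlh] at h1
        rw [hlast] at h2
        have hc0 : c0 = '!' := by simpa using h1
        have he0b : e0 = '!' := by simpa using h2
        exact he0c (by rw [he0b, hc0])
      rw [deltaOf]
      simp only [hne, Bool.false_eq_true, if_false, if_neg hmerge]
      rw [deltaRuns]
      simp only [hRuns, hgl]
      rw [if_neg hlen2, if_pos (by simpa using fun hh : e = c0 => he hh), ← hRuns, ← hbbr]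
    · -- first and last run both carry c0: the merge branch on both sides
      have hb1 : b ≠ 0 := hb
      have hRuns : runsOf text.toList
          = (c0, (a : Int)) :: (runsOf (d :: mid') ++ [(c0, (b : Int))]) := by
        rw [hl, List.append_assoc, runsOf_replicate_append c0 _
            (by rw [List.head?_append_of_ne_nil _ (by simp)]; exact hmhead) a (by omega),
          runsOf_append_replicate c0 b hb1 _ hmlast]
      have hgl : ((c0, (a : Int)) :: (runsOf (d :: mid') ++ [(c0, (b : Int))])).getLastD (' ', 0)
          = (c0, (b : Int)) := by
        rw [List.getLastD_eq_getLast?, ← List.cons_append, List.getLast?_concat]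
        rfl
      have hlen2 : ¬ (((c0, (a : Int)) ::
          (runsOf (d :: mid') ++ [(c0, (b : Int))])).length ≤ 1) := by
        simp
      have hlast : text.toList.getLast? = some c0 := by
        rw [hl]
        obtain ⟨b2, rfl⟩ : ∃ b2, b = b2 + 1 := ⟨b - 1, by omega⟩
        rw [List.replicate_succ', ← List.append_assoc, List.getLast?_concat]
      rw [deltaRuns]
      simp only [hRuns, hgl, List.headD_cons]
      rw [if_neg hlen2, if_neg (by simp),
        show ((c0, (a : Int)) :: (runsOf (d :: mid') ++ [(c0, (b : Int))])).tail
          = runsOf (d :: mid') ++ [(c0, (b : Int))] from rfl,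
        List.dropLast_concat]
      rw [hRuns, bangLoss, bangLoss_append, bangLoss, bangLoss] at hbbr
      by_cases hc0 : c0 = '!'
      · subst hc0
        have hla : leadB text.toList = (a : Int) := by
          rw [hl, List.append_assoc]
          exact leadB_bang_run _ (by simpa using fun h : d = '!' => hd h) a
        have hlb : leadB text.toList.reverse = (b : Int) := by
          rw [hl, List.reverse_append, List.reverse_append, List.reverse_replicate]
          apply leadB_bang_run _ _ b
          rw [List.head?_append_of_ne_nil _ (by simp), List.head?_reverse]
          exact hmlast
        norm_num at hbbr
        rw [deltaOf]
        simp only [hne, Bool.false_eq_true, if_false]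
        rw [if_pos (And.intro hlh hlast), hla, hlb, hbbr]
        simp only [if_true]
        ring
      · have hmerge : ¬ (text.toList.head? = some '!' ∧ text.toList.getLast? = some '!') := by
          rintro ⟨h1, _⟩
          rw [hlh] at h1
          exact hc0 (by simpa using h1)
        simp [hc0] at hbbr
        rw [deltaOf]
        simp only [hne, Bool.false_eq_true, if_false]
        rw [if_neg hmerge, if_neg hc0, hbbr]
        ring

/- ## deltaOf as a function of the '!'-pattern: delta = count·bb + (count−1)·[both outer '!'-runs odd] -/

theorem bb_zero_of_no_bb : ∀ l : List Char, hasBB l = false → bb l = 0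
  | [], _ => rfl
  | [_], _ => rfl
  | c :: d :: t, h => by
    simp only [hasBB, Bool.or_eq_false_iff, Bool.and_eq_false_iff] at h
    rw [bb_cons_cons, if_neg (by
      rintro ⟨h1, h2⟩
      rcases h.1 with hx | hx <;> simp [h1, h2] at hx)]
    exact bb_zero_of_no_bb (d :: t) h.2

theorem bb_nonneg : ∀ l : List Char, 0 ≤ bb l
  | [] => le_refl 0
  | [_] => le_refl 0
  | c :: d :: t => by
    rw [bb_cons_cons]
    split
    · have := bb_nonneg t; omega
    · exact bb_nonneg (d :: t)

theorem one_le_bb : ∀ l : List Char, hasBB l = true → 1 ≤ bb l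
  | [], h => by simp [hasBB] at h
  | [_], h => by simp [hasBB] at h
  | c :: d :: t, h => by
    rw [bb_cons_cons]
    split
    · have := bb_nonneg t; omega
    · rename_i hcd
      simp only [hasBB, Bool.or_eq_true, Bool.and_eq_true, decide_eq_true_eq] at h
      rcases h with ⟨h1, h2⟩ | h2
      · exact absurd ⟨h1, h2⟩ hcd
      · exact one_le_bb (d :: t) h2

theorem leadB_eq_leadBangs : ∀ l : List Char, leadB l = (leadBangs l : Nat) := by
  intro l
  induction l with
  | nil => rfl
  | cons c t ih =>
    simp only [leadB, leadBangs]
    by_cases h : c = '!'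
    · rw [if_pos h, if_pos h, ih]; push_cast; ring
    · rw [if_neg h, if_neg h]; rfl

theorem head_bang_of_leadBangs (l : List Char) (h : leadBangs l ≠ 0) : l.head? = some '!' := by
  cases l with
  | nil => exact absurd rfl h
  | cons c t =>
    by_cases hc : c = '!'
    · rw [hc]; rfl
    · exact absurd (by simp [leadBangs, hc]) h

theorem delta_formula (text : String) (count : Int) (hne : allEq text.toList = false) :
    deltaOf text count = count * bb text.toList + (count - 1) *
      (if leadBangs text.toList % 2 = 1 ∧ leadBangs text.toList.reverse % 2 = 1 then 1
       else 0) := by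
  rw [deltaOf]
  simp only [hne, Bool.false_eq_true, if_false]
  by_cases hm : text.toList.head? = some '!' ∧ text.toList.getLast? = some '!'
  · rw [if_pos hm, leadB_eq_leadBangs, leadB_eq_leadBangs]
    have hJ : (((leadBangs text.toList : Int) + (leadBangs text.toList.reverse : Int)) / 2 : Int)
        = (leadBangs text.toList : Int) / 2 + (leadBangs text.toList.reverse : Int) / 2 +
          (if leadBangs text.toList % 2 = 1 ∧ leadBangs text.toList.reverse % 2 = 1 then 1
           else 0) := by
      by_cases hp : leadBangs text.toList % 2 = 1 ∧ leadBangs text.toList.reverse % 2 = 1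
      · rw [if_pos hp]
        omega
      · rw [if_neg hp]
        rcases Nat.even_or_odd (leadBangs text.toList) with he | ho
        · rw [Nat.even_iff] at he
          omega
        · have h1 : leadBangs text.toList % 2 = 1 := by rw [Nat.odd_iff] at ho; exact ho
          have h2 : leadBangs text.toList.reverse % 2 = 0 := by
            rcases Nat.even_or_odd (leadBangs text.toList.reverse) with he2 | ho2
            · rw [Nat.even_iff] at he2; exact he2
            · rw [Nat.odd_iff] at ho2; exact absurd ⟨h1, ho2⟩ hp
          omega
    rw [hJ]
    ring
  · rw [if_neg hm]
    have hJ0 : ¬ (leadBangs text.toList % 2 = 1 ∧ leadBangs text.toList.reverse % 2 = 1) := by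
      rintro ⟨h1, h2⟩
      apply hm
      refine ⟨head_bang_of_leadBangs _ (by omega), ?_⟩
      rw [← List.head?_reverse]
      exact head_bang_of_leadBangs _ (by omega)
    rw [if_neg hJ0]
    ring

theorem allEq_eq_all : ∀ l : List Char, allEq l = l.all (· == l.headD ' ') := by
  intro l
  cases l with
  | nil => rfl
  | cons c cs => simp [allEq, List.all_cons]

theorem hasBB_iff_any : ∀ l : List Char,
    hasBB l = true ↔ (l.zipWith (fun a b => a == '!' && b == '!') l.tail).any id = true
  | [] => by simp [hasBB]
  | [x] => by simp [hasBB]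
  | c :: d :: t => by
    rw [show (c :: d :: t).tail = d :: t from rfl, List.zipWith_cons_cons, List.any_cons]
    simp only [hasBB, Bool.or_eq_true, Bool.and_eq_true, decide_eq_true_eq, beq_iff_eq, id]
    exact or_congr Iff.rfl (hasBB_iff_any (d :: t))

theorem leadBangs_eq_takeWhile : ∀ l : List Char,
    leadBangs l = (l.takeWhile (· == '!')).length := by
  intro l
  induction l with
  | nil => rfl
  | cons c t ih =>
    simp only [leadBangs, List.takeWhile_cons]
    by_cases h : c = '!'
    · rw [if_pos h, if_pos (by simp [h]), List.length_cons, ih]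
    · rw [if_neg h, if_neg (by simp [h])]
      rfl

theorem D_iff (text : String) (count : Int) : D_solve text count ↔
    (allEq text.toList = false ∧
      ((hasBB text.toList = true ∧ count ≠ 0) ∨
        (leadBangs text.toList % 2 = 1 ∧ leadBangs text.toList.reverse % 2 = 1 ∧
          ¬ (count = 1 ∧ hasBB text.toList = false)))) := by
  unfold D_solve
  simp only []
  rw [← leadBangs_eq_takeWhile, ← leadBangs_eq_takeWhile, ← allEq_eq_all,
    ← hasBB_iff_any]
  by_cases hx : hasBB text.toList = true
  · simp [hx]
  · have hx' : hasBB text.toList = false := by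
      cases h : hasBB text.toList
      · rfl
      · exact absurd h hx
    simp [hx']

theorem deltaOf_zero_of_not_D (text : String) (count : Int) (h : ¬ D_solve text count) :
    deltaOf text count = 0 := by
  rw [D_iff text count] at h
  by_cases hae : allEq text.toList = true
  · simp [deltaOf, hae]
  · have hae' : allEq text.toList = false := by
      cases hx : allEq text.toList
      · rfl
      · exact absurd hx hae
    rw [delta_formula text count hae']
    by_cases hoo : leadBangs text.toList % 2 = 1 ∧ leadBangs text.toList.reverse % 2 = 1
    · rw [if_pos hoo]
      have h2 : count = 1 ∧ hasBB text.toList = false := by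
        by_contra hc
        exact h ⟨hae', Or.inr ⟨hoo.1, hoo.2, hc⟩⟩
      rw [bb_zero_of_no_bb _ h2.2, h2.1]
      ring
    · rw [if_neg hoo]
      by_cases hbbq : hasBB text.toList = true
      · have hc0 : count = 0 := by
          by_contra hc
          exact h ⟨hae', Or.inl ⟨hbbq, hc⟩⟩
        rw [hc0]
        ring
      · have hf : hasBB text.toList = false := by
          cases hx : hasBB text.toList
          · rfl
          · exact absurd hx hbbq
        rw [bb_zero_of_no_bb _ hf]
        ring
-- ===== VERDICT (by name: the statement is the Claim_ definition above) =====
theorem solve_spec : Claim_unchanged_solve := by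
  intro text count _ hpre hnd
  have h := solve_eq_alt_sub_delta text count hpre
  have hz : deltaRuns text count = 0 := by
    rw [← delta_eq]
    exact deltaOf_zero_of_not_D text count hnd
  omega

set_option maxRecDepth 8192 in
theorem solve_changed : Claim_changed_solve := by
  unfold Claim_changed_solve; decide

theorem solve_tight : Claim_exact_solve := by
  intro text count _ hpre hd
  rw [D_iff text count] at hd
  obtain ⟨hae, hcase⟩ := hd
  have heq := solve_eq_alt_sub_delta text count hpre
  rw [← delta_eq text count] at heq
  have hf := delta_formula text count hae
  have hne : deltaOf text count ≠ 0 := by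
    rw [hf]
    rcases hcase with ⟨hbb, hc0⟩ | ⟨h1, h2, h3⟩
    · have hb1 : 1 ≤ bb text.toList := one_le_bb _ hbb
      by_cases hoo : leadBangs text.toList % 2 = 1 ∧ leadBangs text.toList.reverse % 2 = 1
      · rw [if_pos hoo]
        intro hz
        have hprod : count * (bb text.toList + 1) = 1 := by linear_combination hz
        rcases lt_trichotomy count 0 with hneg | h0 | hpos
        · nlinarith
        · exact hc0 h0
        · nlinarith
      · rw [if_neg hoo]
        intro hz
        rw [mul_zero, add_zero] at hz
        exact mul_ne_zero hc0 (by omega) hz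
    · rw [if_pos ⟨h1, h2⟩]
      intro hz
      have hprod : count * (bb text.toList + 1) = 1 := by linear_combination hz
      have hbbn : 0 ≤ bb text.toList := bb_nonneg _
      have hc1 : count = 1 ∧ bb text.toList = 0 := by
        rcases lt_trichotomy count 0 with hneg | h0 | hpos
        · nlinarith
        · simp [h0] at hprod
        · refine ⟨?_, ?_⟩
          · by_contra hc
            have : 2 ≤ count := by omega
            nlinarith
          · by_contra hb
            have : 1 ≤ bb text.toList := by omega
            nlinarith
      apply h3
      refine ⟨hc1.1, ?_⟩
      cases hx : hasBB text.toList
      · rfl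
      · have := one_le_bb _ hx
        omega
  intro hEq
  exact hne (by omega)
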